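-- pv_equiv track=rewrite | github.com/kangkyoungmin/CodingStudy-with-Python- | 8주차/P_기능개발/JY_Function_development.py | solution
-- ===== SOURCE A (Python) =====
-- import math, collections
--
-- def solution(progresses, speeds):
--     answer = []
--     suc = collections.deque()
--
--     for p, s in zip(progresses, speeds):
--         suc.append(math.ceil((100-p)/s))    # 필요한 작업 기간 저장
--     first, count = suc.popleft(), 1
--
--     while len(suc) > 0:
--         p = suc.popleft()
--
--         if first >= p:      # 필요한 기간이 작으면 first와 함께 배포 가능 > count++
--             count += 1
--         else:               # 필요한 기간이 더 크면 배포하고 first가 p로 바뀜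
--             answer.append(count)
--             first, count = p, 1
--
--     answer.append(count)
--     return answer
-- ===== SOURCE B (Python) =====
-- import math, collections
--
-- def solution(progresses, speeds):
--     deploy = []
--     for p, s in zip(progresses, speeds):
--         d = math.ceil((100 - p) / s)
--         deploy.append(max(deploy[-1], d) if deploy else d)
--     return list(collections.Counter(deploy).values())
-- ===== Notes on version B (the rewrite author's own statement) =====
-- stated objective: simpler
-- what changed: Replaces the deque-popping leader sweep (track current leader, count, flush groups) by computing the prefix-maximum deployment day of each task and reading the group sizes off a Counter of that nondecreasing sequence.
import Mathlib
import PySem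

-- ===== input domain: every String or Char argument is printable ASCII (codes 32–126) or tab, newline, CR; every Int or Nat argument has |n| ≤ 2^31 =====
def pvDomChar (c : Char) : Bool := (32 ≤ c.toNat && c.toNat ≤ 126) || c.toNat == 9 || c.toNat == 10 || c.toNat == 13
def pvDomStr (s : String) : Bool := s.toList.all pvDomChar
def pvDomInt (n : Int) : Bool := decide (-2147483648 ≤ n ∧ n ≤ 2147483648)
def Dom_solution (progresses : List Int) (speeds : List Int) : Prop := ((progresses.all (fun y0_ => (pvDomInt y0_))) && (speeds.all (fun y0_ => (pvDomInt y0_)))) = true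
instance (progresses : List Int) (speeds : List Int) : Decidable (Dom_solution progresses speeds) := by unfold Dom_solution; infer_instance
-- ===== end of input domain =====

-- B replaces A's deque leader-sweep by prefix-maximum deployment days fed to a Counter whose
-- values are the group sizes (objective: simpler; same O(n) cost; return value only).

-- ===== PORT A =====
-- math.ceil((100-p)/s): exact integer ceiling division; Python's float ceil agrees with the
-- exact rational ceiling for all |int| ≤ 2^31 (53-bit mantissa), so this port is exact on Dom.
def ceilDaysA (p s : Int) : Int := -(PySem.Int.floordiv (-(100 - p)) s)

-- the while-loop over the deque, state (first, count, answer)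
def loopA : Int → Int → List Int → List Int → List Int
  | _, count, answer, [] => answer ++ [count]
  | first, count, answer, p :: rest =>
      if first ≥ p then loopA first (count + 1) answer rest
      else loopA p 1 (answer ++ [count]) rest

def solution (progresses : List Int) (speeds : List Int) : List Int :=
  let suc := (progresses.zip speeds).map (fun ps => ceilDaysA ps.1 ps.2)
  match suc with
  | [] => []   -- suc.popleft() raises IndexError here in Python; excluded by Pre_solution
  | first :: rest => loopA first 1 [] rest

-- ===== PORT B =====
def ceilDaysB (p s : Int) : Int := -(PySem.Int.floordiv (-(100 - p)) s)

def solution_alt (progresses : List Int) (speeds : List Int) : List Int :=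
  let deploy := (progresses.zip speeds).foldl
    (fun acc ps =>
      let d := ceilDaysB ps.1 ps.2
      acc ++ [match acc.getLast? with | some m => max m d | none => d]) ([] : List Int)
  (PySem.Dict.counter deploy).values

-- ===== PRECONDITION & SPEC =====
-- Pre_ excludes exactly the inputs where A raises: an empty zip (popleft → IndexError)
-- and a zipped speed of 0 (ZeroDivisionError).
def Pre_solution (progresses : List Int) (speeds : List Int) : Prop :=
  progresses ≠ [] ∧ speeds ≠ [] ∧ ∀ ps ∈ progresses.zip speeds, ps.2 ≠ 0
instance (progresses : List Int) (speeds : List Int) : Decidable (Pre_solution progresses speeds) := by unfold Pre_solution; infer_instance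
def pvWitness_solution : List Int × List Int := ([30, 55], [30, 5])

def Spec_solution (progresses : List Int) (speeds : List Int) (out : List Int) : Prop := out = solution_alt progresses speeds
instance (progresses : List Int) (speeds : List Int) (out : List Int) : Decidable (Spec_solution progresses speeds out) := by unfold Spec_solution; infer_instance

-- ===== CLAIM (what is proved, stated in full; the proofs are below) =====
def Claim_equal_solution : Prop := ∀ (progresses : List Int) (speeds : List Int), Dom_solution progresses speeds → Pre_solution progresses speeds → Spec_solution progresses speeds (solution progresses speeds)

-- ===== LEMMAS AND PROOFS =====

-- running prefix maximum of the remaining days, seeded with the current maximum m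
def pmFrom (m : Int) : List Int → List Int
  | [] => []
  | d :: ds => max m d :: pmFrom (max m d) ds

theorem le_pmFrom (l : List Int) (m x : Int) (hx : x ∈ pmFrom m l) : m ≤ x := by
  induction l generalizing m with
  | nil => simp [pmFrom] at hx
  | cons d ds ih =>
    simp only [pmFrom, List.mem_cons] at hx
    rcases hx with h | h
    · subst h; exact le_max_left m d
    · exact le_trans (le_max_left m d) (ih (max m d) h)

theorem loopA_append (l : List Int) (first c : Int) (ans : List Int) :
    loopA first c ans l = ans ++ loopA first c [] l := by
  induction l generalizing first c ans with
  | nil => simp [loopA]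
  | cons p rest ih =>
    by_cases h : first ≥ p
    · simp only [loopA, if_pos h]; exact ih first (c+1) ans
    · simp only [loopA, if_neg h]
      rw [ih p 1 (ans ++ [c]), ih p 1 ([] ++ [c])]
      simp

theorem foldB (l : List (Int × Int)) (acc : List Int) (m : Int) (h : acc.getLast? = some m) :
    l.foldl (fun acc ps =>
        acc ++ [match acc.getLast? with
                | some m' => max m' (ceilDaysB ps.1 ps.2)
                | none => ceilDaysB ps.1 ps.2]) acc
      = acc ++ pmFrom m (l.map (fun ps => ceilDaysB ps.1 ps.2)) := by
  induction l generalizing acc m with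
  | nil => simp [pmFrom]
  | cons d ds ih =>
    simp only [List.foldl_cons, List.map_cons, pmFrom, h]
    rw [ih (acc ++ [max m (ceilDaysB d.1 d.2)]) (max m (ceilDaysB d.1 d.2)) (by simp)]
    simp

theorem foldl_add_cons (xs : List Int) (x : Int) (acc : List Int) (hx : x ∉ xs) :
    List.foldl PySem.Set.add (x :: acc) xs = x :: List.foldl PySem.Set.add acc xs := by
  induction xs generalizing acc with
  | nil => rfl
  | cons y ys ih =>
    have hyx : (y == x) = false := by
      simp only [beq_eq_false_iff_ne]; intro h; exact hx (h ▸ List.mem_cons_self)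
    have hstep : PySem.Set.add (x :: acc) y = x :: PySem.Set.add acc y := by
      by_cases h : y ∈ acc <;>
        simp [PySem.Set.add, beq_eq_false_iff_ne.1 hyx, h]
    simp only [List.foldl_cons, hstep]
    exact ih _ (fun h => hx (List.mem_cons_of_mem _ h))

theorem ofList_cons_dup (x : Int) (xs : List Int) :
    PySem.Set.ofList (x :: x :: xs) = PySem.Set.ofList (x :: xs) := by
  simp [PySem.Set.ofList, PySem.Set.add]

theorem ofList_cons_not_mem (x : Int) (xs : List Int) (hx : x ∉ xs) :
    PySem.Set.ofList (x :: xs) = x :: PySem.Set.ofList xs := by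
  simp only [PySem.Set.ofList, List.foldl_cons]
  have h0 : PySem.Set.add PySem.Set.empty x = [x] := by rfl
  rw [h0]
  exact foldl_add_cons xs x _ hx

theorem countLem (l : List Int) (first c : Int) :
    loopA first c [] l =
      (PySem.Set.ofList (first :: pmFrom first l)).map
        (fun k => if k = first then c + (List.count k (pmFrom first l) : Int)
                  else (List.count k (pmFrom first l) : Int)) := by
  induction l generalizing first c with
  | nil =>
    simp [loopA, pmFrom, PySem.Set.ofList, PySem.Set.add, PySem.Set.empty]
  | cons p rest ih =>
    by_cases h : first ≥ p
    · have hm : max first p = first := max_eq_left h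
      simp only [loopA, if_pos h, pmFrom, hm]
      rw [ih first (c + 1), ofList_cons_dup]
      apply List.map_congr_left
      intro k _
      by_cases hk : k = first <;>
        simp [hk, List.count_cons] <;> push_cast <;> omega
    · have hlt : first < p := lt_of_not_ge h
      have hm : max first p = p := max_eq_right (le_of_lt hlt)
      simp only [loopA, if_neg h, pmFrom, hm]
      rw [loopA_append, ih p 1]
      have hnm : first ∉ (p :: pmFrom p rest) := by
        intro hmem
        rcases List.mem_cons.1 hmem with h1 | h1
        · omega
        · exact absurd (le_pmFrom _ _ _ h1) (by omega)
      rw [ofList_cons_not_mem _ _ hnm]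
      have hc0 : List.count first (p :: pmFrom p rest) = 0 :=
        List.count_eq_zero.2 hnm
      simp only [List.map_cons, List.nil_append, List.singleton_append]
      congr 1
      · rw [hc0]; simp
      apply List.map_congr_left
      intro k hk
      have hk' : k ∈ p :: pmFrom p rest := (PySem.Set.mem_ofList _ _).1 hk
      have hkf : k ≠ first := fun e => hnm (e ▸ hk')
      by_cases hkp : k = p <;>
        simp [hkf, hkp, List.count_cons] <;> push_cast <;> omega

theorem mainLem (d0 : Int) (dr : List Int) :
    loopA d0 1 [] dr = (PySem.Dict.counter ([d0] ++ pmFrom d0 dr)).values := by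
  have hvals : (PySem.Dict.counter (d0 :: pmFrom d0 dr)).values
      = (PySem.Set.ofList (d0 :: pmFrom d0 dr)).map
          (fun k => (List.count k (d0 :: pmFrom d0 dr) : Int)) := by
    have h1 : (PySem.Dict.counter (d0 :: pmFrom d0 dr)).values
        = (PySem.Dict.counter (d0 :: pmFrom d0 dr)).items.map Prod.snd := rfl
    simp only [h1, PySem.Dict.items_counter, List.map_map]
    rfl
  simp only [List.singleton_append, hvals, countLem]
  apply List.map_congr_left
  intro k _
  by_cases hk : k = d0 <;> simp [hk, List.count_cons] <;> push_cast <;> omega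

-- ===== VERDICT (by name: the statement is the Claim_ definition above) =====
theorem solution_spec : Claim_equal_solution := by
  intro ps ss _ hpre
  obtain ⟨hp, hs, _⟩ := hpre
  unfold Spec_solution
  match ps, ss with
  | [], _ => exact absurd rfl hp
  | _ :: _, [] => exact absurd rfl hs
  | p0 :: pt, s0 :: st =>
    simp only [solution, solution_alt, List.zip_cons_cons, List.map_cons, List.foldl_cons]
    rw [show ([] ++ [match List.getLast? ([] : List Int) with
          | some m => max m (ceilDaysB p0 s0) | none => ceilDaysB p0 s0])
        = [ceilDaysA p0 s0] from rfl]
    rw [foldB (pt.zip st) [ceilDaysA p0 s0] (ceilDaysA p0 s0) (by simp)]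
    exact mainLem (ceilDaysA p0 s0) ((pt.zip st).map fun ps => ceilDaysB ps.1 ps.2)
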